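-- pv_equiv track=rewrite | github.com/AdamZhouSE/pythonHomework | Code/CodeRecords/2521/60797/303447.py | find
-- ===== SOURCE A (Python) =====
-- def find(b):
--     d=dict()
--     for a in b:
--         d[a]=b.count(a)
--     d = sorted(d.items(), key=lambda x:x[1], reverse=True)
--     re = [0 for i in range(len(b))]
--     p=0
--     for it in d:
--         for i in range(it[1]):
--             re[p]=it[0]
--             p+=2
--             if p>len(b)-1:
--                 p=1
--     return re
-- ===== SOURCE B (Python) =====
-- def find(b):
--     n = len(b)
--     counts = {}
--     for a in b:
--         counts[a] = counts.get(a, 0) + 1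
--     # counting sort by frequency: bucket values by their count, read buckets
--     # from the highest count down (first-appearance order within a bucket
--     # matches Python's stable sort on equal counts)
--     buckets = [[] for _ in range(n + 1)]
--     for v, c in counts.items():
--         buckets[c].append(v)
--     flat = []
--     for c in range(n, 0, -1):
--         for v in buckets[c]:
--             flat.extend([v] * c)
--     # interleave: first half of flat goes to even slots, second half to odd
--     half = (n + 1) // 2
--     evens, odds = flat[:half], flat[half:]
--     res = []
--     for i, e in enumerate(evens):
--         res.append(e)
--         if i < len(odds):
--             res.append(odds[i])
--     return res
-- ===== Notes on version B (the rewrite author's own statement) =====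
-- stated objective: faster
-- what changed: B replaces A's quadratic b.count-per-element counting and its comparison sort by a one-pass counter plus a counting sort (buckets indexed by frequency, read from the highest count down), and replaces A's manually wrapped write pointer by a single loop that weaves the first half of the expanded list into the even slots and the second half into the odd slots.
import Mathlib
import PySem

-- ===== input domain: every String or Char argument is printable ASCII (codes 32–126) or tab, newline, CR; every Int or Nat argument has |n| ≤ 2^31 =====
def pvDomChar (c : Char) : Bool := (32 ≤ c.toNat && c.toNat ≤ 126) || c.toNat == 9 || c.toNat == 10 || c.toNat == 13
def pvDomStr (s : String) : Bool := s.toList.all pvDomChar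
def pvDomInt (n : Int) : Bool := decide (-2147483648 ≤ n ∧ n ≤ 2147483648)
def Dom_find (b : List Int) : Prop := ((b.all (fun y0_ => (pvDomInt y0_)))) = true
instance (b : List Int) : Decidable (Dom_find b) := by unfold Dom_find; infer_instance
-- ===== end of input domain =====

-- B replaces A's O(n^2) repeated b.count and comparison sort by a one-pass counter plus a
-- counting sort over frequency buckets, and A's wrapping write pointer by one loop that weaves
-- the two halves of the expanded list into the even and odd slots: faster, no sort call.

-- ===== PORT A =====
-- literal transliteration of A: dict rebuilt with b.count(a) per element, sorted by count
-- descending, then the wrapping-pointer fill loop (re[p] = it[0]; p += 2; wrap to 1).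
-- re[p] = it[0] is pySetD: p is always in range when the Python runs (it never raises).
def find (b : List Int) : List Int :=
  let d := b.foldl (fun d a => d.insert a ((PySem.List.count b a : Int))) PySem.Dict.empty
  let ds := PySem.List.sorted d.items (fun x => x.2) true
  let re := (PySem.List.pyRange 0 (b.length : Int)).map (fun _ => (0 : Int))
  (ds.foldl (fun (st : List Int × Int) it =>
      (PySem.List.pyRange 0 it.2).foldl (fun (st : List Int × Int) _ =>
          (PySem.List.pySetD st.1 st.2 it.1,
           if st.2 + 2 > (b.length : Int) - 1 then 1 else st.2 + 2)) st)
    (re, 0)).1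

-- ===== PORT B =====
-- literal transliteration of B: one-pass count dict, buckets indexed by count, flat built by
-- reading buckets from count n down to 1, then the interleaving loop over enumerate(evens).
def find_alt (b : List Int) : List Int :=
  let n := b.length
  let counts := b.foldl (fun d a => d.insert a (d.getD a 0 + 1)) PySem.Dict.empty
  let buckets := counts.items.foldl
      (fun bk (it : Int × Int) =>
        PySem.List.pySetD bk it.2 (PySem.List.pyGetD bk it.2 [] ++ [it.1]))
      (List.replicate (n + 1) ([] : List Int))
  let flat := (PySem.List.pyRange (n : Int) 0 (-1)).foldl
      (fun acc c => (PySem.List.pyGetD buckets c []).foldl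
          (fun acc v => acc ++ PySem.List.pyRepeat [v] c) acc) []
  let half := PySem.Int.floordiv ((n : Int) + 1) 2
  let evens := PySem.List.slice flat none (some half)
  let odds := PySem.List.slice flat (some half)
  (evens.zipIdx).foldl (fun res (p : Int × Nat) =>
      let res := res ++ [p.1]
      if p.2 < odds.length then res ++ [PySem.List.pyGetD odds (p.2 : Int) 0] else res) []

-- ===== PRECONDITION & SPEC =====
def Spec_find (b : List Int) (out : List Int) : Prop := out = find_alt b
instance (b : List Int) (out : List Int) : Decidable (Spec_find b out) := by unfold Spec_find; infer_instance

-- ===== CLAIM (what is proved, stated in full; the proofs are below) =====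
def Claim_equal_find : Prop := ∀ (b : List Int), Dom_find b → Spec_find b (find b)

-- ===== LEMMAS AND PROOFS =====

-- A's write step on the state (re, p), with n = len(b).
def stepW (n : Int) (st : List Int × Int) (x : Int) : List Int × Int :=
  (PySem.List.pySetD st.1 st.2 x, if st.2 + 2 > n - 1 then 1 else st.2 + 2)

-- sequential writes at positions q, q+2, q+4, …
def writeAt2 : List Int → Nat → List Int → List Int
  | re, _, [] => re
  | re, q, x :: xs => writeAt2 (re.set q x) (q + 2) xs

theorem length_writeAt2 (xs : List Int) : ∀ (re : List Int) (q : Nat),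
    (writeAt2 re q xs).length = re.length := by
  induction xs with
  | nil => intro re q; rfl
  | cons x t ih => intro re q; simp [writeAt2, ih]

-- a fold whose body ignores the element depends only on the length
theorem foldl_const_len {α β γ : Type} (g : γ → γ) :
    ∀ (l1 : List α) (l2 : List β) (i : γ), l1.length = l2.length →
      l1.foldl (fun s _ => g s) i = l2.foldl (fun s _ => g s) i := by
  intro l1
  induction l1 with
  | nil => intro l2 i h; cases l2 <;> simp_all
  | cons a t ih =>
    intro l2 i h
    cases l2 with
    | nil => simp at h
    | cons b t2 => simp only [List.foldl_cons]; exact ih t2 (g i) (by simpa using h)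

-- folding a function over replicate m x equals folding (fun s _ => g s x)
theorem foldl_replicate_eta {γ : Type} (g : γ → Int → γ) (x : Int) :
    ∀ (m : Nat) (st : γ),
      (List.replicate m x).foldl (fun s _ => g s x) st = (List.replicate m x).foldl g st := by
  intro m
  induction m with
  | zero => intro st; rfl
  | succ k ih => intro st; simp only [List.replicate_succ, List.foldl_cons]; exact ih _

-- the inner 'for i in range(c): write x' equals folding stepW over replicate c x
theorem inner_loop_eq (n c x : Int) (st : List Int × Int) :
    (PySem.List.pyRange 0 c).foldl (fun st _ => stepW n st x) st
      = (List.replicate c.toNat x).foldl (stepW n) st := by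
  rw [← foldl_replicate_eta (stepW n) x c.toNat st]
  apply foldl_const_len
  simp [PySem.List.length_pyRange_one]

-- running stepW over xs from position q (no mid-run wrap): writes at q, q+2, …
theorem run_gen (n : Nat) (xs : List Int) : ∀ (re : List Int) (q : Nat),
    q + 2 * xs.length ≤ n + 1 →
    xs.foldl (stepW (n : Int)) (re, (q : Nat)) =
      (writeAt2 re q xs,
       if xs = [] then ((q : Nat) : Int)
       else if ((n : Int) - 1 < (q : Int) + 2 * xs.length) then 1
       else (q : Int) + 2 * xs.length) := by
  induction xs with
  | nil => intro re q h; simp [writeAt2]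
  | cons x t ih =>
    intro re q h
    simp only [List.foldl_cons]
    have hstep : stepW (n : Int) ((re, (q : Nat)) : List Int × Int) x
        = (re.set q x, if (q : Int) + 2 > (n : Int) - 1 then 1 else (q : Int) + 2) := by
      simp [stepW, PySem.List.pySetD_natCast]
    rw [hstep]
    cases t with
    | nil =>
      simp only [List.foldl_nil, writeAt2, Prod.mk.injEq]
      refine ⟨trivial, ?_⟩
      rw [if_neg (List.cons_ne_nil x [])]
      simp only [List.length_cons, List.length_nil]
      split_ifs with h1 h2 h2 <;> omega
    | cons y s =>
      have hc : ¬ ((q : Int) + 2 > (n : Int) - 1) := by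
        simp only [List.length_cons] at h
        omega
      rw [if_neg hc]
      have hq2 : ((q : Int) + 2) = (((q + 2 : Nat)) : Int) := by push_cast; ring
      rw [hq2, ih (re.set q x) (q + 2) (by simp only [List.length_cons] at h ⊢; omega)]
      simp only [writeAt2, Prod.mk.injEq]
      refine ⟨trivial, ?_⟩
      rw [if_neg (List.cons_ne_nil y s), if_neg (List.cons_ne_nil x (y :: s))]
      simp only [List.length_cons]
      split_ifs with h1 h2 h2 <;> omega

-- pointwise characterisation of writeAt2
theorem getD_writeAt2 (xs : List Int) : ∀ (re : List Int) (q i : Nat),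
    q + 2 * xs.length ≤ re.length + 1 →
    (writeAt2 re q xs).getD i 0 =
      if q ≤ i ∧ (i - q) % 2 = 0 ∧ (i - q) / 2 < xs.length then xs.getD ((i - q) / 2) 0
      else re.getD i 0 := by
  induction xs with
  | nil =>
    intro re q i h
    simp only [writeAt2, List.length_nil]
    rw [if_neg]
    rintro ⟨_, _, h3⟩
    omega
  | cons x t ih =>
    intro re q i h
    have hlen : (re.set q x).length = re.length := by simp
    have hbound : (q + 2) + 2 * t.length ≤ (re.set q x).length + 1 := by
      rw [hlen]; simp only [List.length_cons] at h; omega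
    simp only [writeAt2]
    rw [ih (re.set q x) (q + 2) i hbound]
    by_cases hi : i = q
    · subst hi
      rw [if_neg (by omega), if_pos (by refine ⟨le_refl _, ?_, ?_⟩ <;> simp)]
      have hq : i < re.length := by simp only [List.length_cons] at h; omega
      simp [List.getD_eq_getElem?_getD, hq]
    · have hset : (re.set q x).getD i 0 = re.getD i 0 := by
        simp [List.getD_eq_getElem?_getD, Ne.symm hi]
      rw [hset]
      by_cases hc : q ≤ i ∧ (i - q) % 2 = 0 ∧ (i - q) / 2 < t.length + 1
      · obtain ⟨h1, h2, h3⟩ := hc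
        have hge : q + 2 ≤ i := by omega
        rw [if_pos ⟨hge, by omega, by omega⟩,
            if_pos (by simp only [List.length_cons]; exact ⟨h1, h2, h3⟩)]
        have hidx : (i - q) / 2 = (i - (q + 2)) / 2 + 1 := by omega
        rw [hidx]
        simp
      · rw [if_neg ?hneg, if_neg (by simpa only [List.length_cons] using hc)]
        case hneg => rintro ⟨ha, hb, hcc⟩; exact hc ⟨by omega, by omega, by omega⟩

-- A's count-dict: items are (first-occurrence keys, f key) for any value function f
theorem items_foldl_insert_fn (f : Int → Int) :
    ∀ (l : List Int) (d : PySem.Dict Int Int) (s : List Int),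
      d.items = s.map (fun k => (k, f k)) →
      (l.foldl (fun d a => d.insert a (f a)) d).items
        = (PySem.Set.update s l).map (fun k => (k, f k)) := by
  intro l
  induction l with
  | nil => intro d s h; simpa [PySem.Set.update] using h
  | cons a t ih =>
    intro d s h
    have hkeys : d.keys = s := by
      simp only [PySem.Dict.keys, h, List.map_map]
      simp [Function.comp_def]
    have hcont : d.contains a = decide (a ∈ s) := by
      rw [PySem.Dict.contains_eq_decide_mem_keys, hkeys]
    simp only [List.foldl_cons]
    by_cases hmem : a ∈ s
    · have h1 : (d.insert a (f a)).items = s.map (fun k => (k, f k)) := by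
        rw [PySem.Dict.items_insert_of_contains d (f a) (by rw [hcont]; simpa), h,
            List.map_map]
        apply List.map_congr_left
        intro k _
        by_cases hk : k = a
        · subst hk; simp
        · simp [Function.comp, hk]
      have hadd : PySem.Set.add s a = s := by
        simp [PySem.Set.add, PySem.Set.contains, hmem]
      rw [ih _ s h1]
      simp [PySem.Set.update, hadd]
    · have h1 : (d.insert a (f a)).items = (s ++ [a]).map (fun k => (k, f k)) := by
        rw [PySem.Dict.items_insert_of_not_contains d (f a) (by rw [hcont]; simpa), h]
        simp
      have hadd : PySem.Set.add s a = s ++ [a] := by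
        simp [PySem.Set.add, PySem.Set.contains, hmem]
      rw [ih _ (s ++ [a]) h1]
      simp [PySem.Set.update, hadd]

-- both dicts carry the same items list
theorem dicts_items_eq (b : List Int) :
    (b.foldl (fun d a => d.insert a ((PySem.List.count b a : Int))) PySem.Dict.empty).items
      = (b.foldl (fun d a => d.insert a (d.getD a 0 + 1)) (PySem.Dict.empty : PySem.Dict Int Int)).items := by
  rw [PySem.Dict.foldl_insert_getD_add_one_eq_counter, PySem.Dict.items_counter]
  rw [items_foldl_insert_fn (fun a => (PySem.List.count b a : Int)) b PySem.Dict.empty [] rfl]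
  have : PySem.Set.update ([] : PySem.Set Int) b = PySem.Set.ofList b := rfl
  rw [this]
  apply List.map_congr_left
  intro k _
  simp [PySem.List.count_eq]

-- the flat list has exactly len(b) elements
theorem length_flat (b : List Int) :
    ((PySem.List.sorted
        ((b.foldl (fun d a => d.insert a (d.getD a 0 + 1)) (PySem.Dict.empty : PySem.Dict Int Int)).items)
        (fun x => x.2) true).flatMap
      (fun it => List.replicate it.2.toNat it.1)).length = b.length := by
  rw [PySem.Dict.foldl_insert_getD_add_one_eq_counter]
  have hperm : (PySem.List.sorted ((PySem.Dict.counter b).items) (fun x => x.2) true).Perm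
      ((PySem.Dict.counter b).items) := PySem.List.sorted_perm _ _ _
  rw [List.length_flatMap]
  rw [(hperm.map (fun a => (List.replicate a.2.toNat a.1).length)).sum_eq]
  rw [PySem.Dict.items_counter, List.map_map]
  have hperm2 : (PySem.Set.ofList b).Perm b.dedup := by
    rw [List.perm_ext_iff_of_nodup (PySem.Set.nodup_ofList b) (List.nodup_dedup b)]
    intro a
    rw [PySem.Set.mem_ofList, List.mem_dedup]
  have := (hperm2.map (fun x => List.count x b)).sum_eq
  calc ((PySem.Set.ofList b).map
          ((fun a => (List.replicate a.2.toNat a.1).length) ∘ fun k => (k, (List.count k b : Int)))).sum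
      = ((PySem.Set.ofList b).map (fun x => List.count x b)).sum := by
        apply congrArg
        apply List.map_congr_left
        intro k _
        simp [Function.comp]
    _ = (b.dedup.map (fun x => List.count x b)).sum := this
    _ = b.length := List.sum_map_count_dedup_eq_length b

-- the shared flat list: sorted (value, count) pairs expanded
def flatList (b : List Int) : List Int :=
  (PySem.List.sorted
      ((b.foldl (fun d a => d.insert a (d.getD a 0 + 1)) (PySem.Dict.empty : PySem.Dict Int Int)).items)
      (fun x => x.2) true).flatMap (fun it => List.replicate it.2.toNat it.1)

-- ===== stable sort = counting sort (buckets read in descending key order) =====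

-- insertBy with Python's reverse comparator on a descending list inserts after the equals
theorem insertBy_takeWhile {α : Type} (key : α → Int) (x : α) :
    ∀ (acc : List α), acc.Pairwise (fun a b => key b ≤ key a) →
      PySem.List.insertBy (fun a b => decide (key b < key a)) x acc
        = acc.takeWhile (fun y => decide (key x ≤ key y)) ++ x :: acc.dropWhile (fun y => decide (key x ≤ key y)) := by
  intro acc
  induction acc with
  | nil => intro _; rfl
  | cons y ys ih =>
    intro h
    rw [List.pairwise_cons] at h
    by_cases hy : key y < key x
    · simp [PySem.List.insertBy, hy, not_le.mpr hy]
    · simp only [PySem.List.insertBy, hy, decide_false, Bool.false_eq_true, if_false,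
        List.takeWhile_cons, List.dropWhile_cons, not_lt.mp hy, decide_true, ih h.2]
      simp

-- everything the dropWhile leaves has a strictly smaller key
theorem dropWhile_key_lt {α : Type} (key : α → Int) (x : α) :
    ∀ (acc : List α), acc.Pairwise (fun a b => key b ≤ key a) →
      ∀ y ∈ acc.dropWhile (fun y => decide (key x ≤ key y)), key y < key x := by
  intro acc
  induction acc with
  | nil => intro _ y hy; simp at hy
  | cons a as ih =>
    intro h
    rw [List.pairwise_cons] at h
    by_cases ha : key x ≤ key a
    · simpa [List.dropWhile_cons, ha] using ih h.2
    · intro y hy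
      rw [List.dropWhile_cons, if_neg (by simp [ha])] at hy
      rcases List.mem_cons.mp hy with rfl | hy'
      · omega
      · have := h.1 y hy'
        omega

-- insertBy preserves descending order
theorem insertBy_pairwise {α : Type} (key : α → Int) (x : α) (acc : List α)
    (h : acc.Pairwise (fun a b => key b ≤ key a)) :
    (PySem.List.insertBy (fun a b => decide (key b < key a)) x acc).Pairwise
      (fun a b => key b ≤ key a) := by
  rw [insertBy_takeWhile key x acc h]
  have hsplit := (List.takeWhile_append_dropWhile (p := fun y => decide (key x ≤ key y)) (l := acc))
  have hacc : (acc.takeWhile (fun y => decide (key x ≤ key y))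
      ++ acc.dropWhile (fun y => decide (key x ≤ key y))).Pairwise (fun a b => key b ≤ key a) := by
    rwa [hsplit]
  rw [List.pairwise_append] at hacc ⊢
  obtain ⟨hT, hD, hTD⟩ := hacc
  refine ⟨hT, ?_, ?_⟩
  · rw [List.pairwise_cons]
    exact ⟨fun y hy => le_of_lt (dropWhile_key_lt key x acc h y hy), hD⟩
  · intro a ha b hb
    rcases List.mem_cons.mp hb with rfl | hb'
    · have := List.mem_takeWhile_imp ha
      simpa using this
    · exact hTD a ha b hb'

-- stability of one insertion, seen through a key-class filter
theorem filter_insertBy {α : Type} (key : α → Int) (c : Int) (x : α) (acc : List α)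
    (h : acc.Pairwise (fun a b => key b ≤ key a)) :
    (PySem.List.insertBy (fun a b => decide (key b < key a)) x acc).filter (fun y => decide (key y = c))
      = if key x = c then acc.filter (fun y => decide (key y = c)) ++ [x]
        else acc.filter (fun y => decide (key y = c)) := by
  rw [insertBy_takeWhile key x acc h, List.filter_append, List.filter_cons]
  have hsplit : acc.filter (fun y => decide (key y = c))
      = (acc.takeWhile (fun y => decide (key x ≤ key y))).filter (fun y => decide (key y = c))
        ++ (acc.dropWhile (fun y => decide (key x ≤ key y))).filter (fun y => decide (key y = c)) := by
    rw [← List.filter_append, List.takeWhile_append_dropWhile]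
  by_cases hx : key x = c
  · have hD : (acc.dropWhile (fun y => decide (key x ≤ key y))).filter (fun y => decide (key y = c)) = [] := by
      rw [List.filter_eq_nil_iff]
      intro y hy
      have := dropWhile_key_lt key x acc h y hy
      simp; omega
    rw [hsplit, hD]
    simp [hx]
  · rw [hsplit]
    simp [hx]

theorem foldl_insertBy_filter {α : Type} (key : α → Int) (c : Int) :
    ∀ (xs : List α) (acc : List α), acc.Pairwise (fun a b => key b ≤ key a) →
      (xs.foldl (fun acc x => PySem.List.insertBy (fun a b => decide (key b < key a)) x acc) acc).filter
          (fun y => decide (key y = c))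
        = acc.filter (fun y => decide (key y = c)) ++ xs.filter (fun y => decide (key y = c)) := by
  intro xs
  induction xs with
  | nil => intro acc _; simp
  | cons x t ih =>
    intro acc h
    simp only [List.foldl_cons]
    rw [ih _ (insertBy_pairwise key x acc h), filter_insertBy key c x acc h, List.filter_cons]
    by_cases hx : key x = c <;> simp [hx]

-- stability of the whole sort: sorting does not reorder a key class
theorem sorted_rev_filter {α : Type} (key : α → Int) (c : Int) (xs : List α) :
    (PySem.List.sorted xs key true).filter (fun y => decide (key y = c))
      = xs.filter (fun y => decide (key y = c)) := by
  rw [PySem.List.sorted_rev_eq_foldl_insertBy]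
  simpa using foldl_insertBy_filter key c xs [] List.Pairwise.nil

theorem dropWhile_eqc_lt {α : Type} (key : α → Int) (c : Int) :
    ∀ (l : List α), l.Pairwise (fun a b => key b ≤ key a) → (∀ y ∈ l, key y ≤ c) →
      ∀ y ∈ l.dropWhile (fun y => decide (key y = c)), key y < c := by
  intro l
  induction l with
  | nil => intro _ _ y hy; simp at hy
  | cons a as ih =>
    intro h hle
    rw [List.pairwise_cons] at h
    by_cases ha : key a = c
    · rw [List.dropWhile_cons, if_pos (by simp [ha])]
      exact ih h.2 (fun y hy => hle y (List.mem_cons_of_mem a hy))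
    · intro y hy
      rw [List.dropWhile_cons, if_neg (by simp [ha])] at hy
      rcases List.mem_cons.mp hy with rfl | hy'
      · have := hle y (List.mem_cons_self)
        omega
      · have h1 := h.1 y hy'
        have h2 := hle a List.mem_cons_self
        omega

-- a descending list is the concatenation of its key classes, in descending key order
theorem desc_eq_flatMap_filter {α : Type} (key : α → Int) :
    ∀ (cs : List Int) (l : List α), l.Pairwise (fun a b => key b ≤ key a) →
      cs.Pairwise (fun a b => b < a) → (∀ y ∈ l, key y ∈ cs) →
      l = cs.flatMap (fun c => l.filter (fun y => decide (key y = c))) := by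
  intro cs
  induction cs with
  | nil =>
    intro l _ _ hcov
    cases l with
    | nil => rfl
    | cons y ys => exact absurd (hcov y List.mem_cons_self) (List.not_mem_nil)
  | cons c cs' ih =>
    intro l hdesc hcs hcov
    rw [List.pairwise_cons] at hcs
    have hle : ∀ y ∈ l, key y ≤ c := by
      intro y hy
      rcases List.mem_cons.mp (hcov y hy) with h | h
      · omega
      · have := hcs.1 _ h; omega
    have hRlt : ∀ y ∈ l.dropWhile (fun y => decide (key y = c)), key y < c :=
      dropWhile_eqc_lt key c l hdesc hle
    have hPmem : ∀ y ∈ l.takeWhile (fun y => decide (key y = c)), key y = c := by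
      intro y hy
      simpa using List.mem_takeWhile_imp hy
    have hfilc : l.filter (fun y => decide (key y = c)) = l.takeWhile (fun y => decide (key y = c)) := by
      conv_lhs => rw [← List.takeWhile_append_dropWhile (p := fun y => decide (key y = c)) (l := l)]
      rw [List.filter_append]
      rw [List.filter_eq_self.mpr (fun y hy => by simpa using hPmem y hy),
          List.filter_eq_nil_iff.mpr (fun y hy => by have := hRlt y hy; simp; omega)]
      simp
    have hRdesc : (l.dropWhile (fun y => decide (key y = c))).Pairwise (fun a b => key b ≤ key a) :=
      hdesc.sublist (List.dropWhile_sublist _)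
    have hRcov : ∀ y ∈ l.dropWhile (fun y => decide (key y = c)), key y ∈ cs' := by
      intro y hy
      have hlt := hRlt y hy
      rcases List.mem_cons.mp (hcov y ((List.dropWhile_sublist _).mem hy)) with h | h
      · omega
      · exact h
    have hfilc' : ∀ c' ∈ cs', l.filter (fun y => decide (key y = c'))
        = (l.dropWhile (fun y => decide (key y = c))).filter (fun y => decide (key y = c')) := by
      intro c' hc'
      conv_lhs => rw [← List.takeWhile_append_dropWhile (p := fun y => decide (key y = c)) (l := l)]
      rw [List.filter_append, List.filter_eq_nil_iff.mpr (fun y hy => by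
        have h1 := hPmem y hy
        have h2 := hcs.1 _ hc'
        simp; omega)]
      simp
    have hIH := ih (l.dropWhile (fun y => decide (key y = c))) hRdesc hcs.2 hRcov
    have hIH' : l.dropWhile (fun y => decide (key y = c))
        = cs'.flatMap (fun c' => l.filter (fun y => decide (key y = c'))) := by
      rw [hIH]
      exact List.flatMap_congr (fun c' hc' => (hfilc' c' hc').symm)
    rw [List.flatMap_cons, hfilc, ← hIH', List.takeWhile_append_dropWhile]

-- ===== B's buckets and flat list =====

theorem pyRange_desc (n : Nat) :
    PySem.List.pyRange (n : Int) 0 (-1) = (List.range n).map (fun k : Nat => (n : Int) - (k : Int)) := by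
  rw [PySem.List.pyRange]
  norm_num
  rcases Nat.eq_zero_or_pos n with h | h
  · subst h; simp
  · rw [if_pos (by exact_mod_cast h)]
    simp [sub_eq_add_neg]

theorem buckets_getD (its : List (Int × Int)) :
    ∀ (bk : List (List Int)) (c : Int), 0 ≤ c → c < (bk.length : Int) →
      (∀ it ∈ its, 0 ≤ it.2 ∧ it.2 < (bk.length : Int)) →
      PySem.List.pyGetD
        (its.foldl (fun bk it => PySem.List.pySetD bk it.2 (PySem.List.pyGetD bk it.2 [] ++ [it.1])) bk)
        c []
        = PySem.List.pyGetD bk c [] ++ ((its.filter (fun it => decide (it.2 = c))).map (·.1)) := by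
  induction its with
  | nil => intro bk c _ _ _; simp
  | cons it its ih =>
    intro bk c hc0 hclen hall
    have hit := hall it List.mem_cons_self
    have hlen : (PySem.List.pySetD bk it.2 (PySem.List.pyGetD bk it.2 [] ++ [it.1])).length = bk.length :=
      PySem.List.length_pySetD _ _ _
    simp only [List.foldl_cons]
    rw [ih _ c hc0 (by rw [hlen]; exact hclen)
        (fun x hx => by rw [hlen]; exact hall x (List.mem_cons_of_mem it hx))]
    have hcast : it.2 = ((it.2.toNat : Nat) : Int) := by omega
    have hccast : c = ((c.toNat : Nat) : Int) := by omega
    have hget := PySem.List.pyGetD_pySetD_natCast bk it.2.toNat c.toNat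
      (PySem.List.pyGetD bk it.2 [] ++ [it.1]) [] (by omega)
    rw [← hcast, ← hccast] at hget
    rw [hget, List.filter_cons]
    by_cases h : it.2 = c
    · rw [if_pos (show c.toNat = it.2.toNat by omega),
          if_pos (show (decide (it.2 = c)) = true by simp [h])]
      simp [h]
    · rw [if_neg (show ¬ c.toNat = it.2.toNat by omega),
          if_neg (show ¬ (decide (it.2 = c)) = true by simp [h])]

-- expanding a bucket: every member of the filter has count c
theorem flatMap_filter_const (c : Int) :
    ∀ (l : List (Int × Int)),
      ((l.filter (fun it => decide (it.2 = c))).map (·.1)).flatMap (fun v => List.replicate c.toNat v)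
        = (l.filter (fun it => decide (it.2 = c))).flatMap (fun it => List.replicate it.2.toNat it.1) := by
  intro l
  induction l with
  | nil => rfl
  | cons it its ih =>
    rw [List.filter_cons]
    by_cases h : it.2 = c
    · rw [if_pos (by simp [h])]
      simp only [List.map_cons, List.flatMap_cons, ih, h]
    · rw [if_neg (by simp [h])]
      exact ih

-- B's flat-building fold equals flatList b
theorem flatB_eq (b : List Int) :
    (PySem.List.pyRange (b.length : Int) 0 (-1)).foldl
      (fun acc c =>
        (PySem.List.pyGetD
            ((b.foldl (fun d a => d.insert a (d.getD a 0 + 1)) (PySem.Dict.empty : PySem.Dict Int Int)).items.foldl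
              (fun bk (it : Int × Int) =>
                PySem.List.pySetD bk it.2 (PySem.List.pyGetD bk it.2 [] ++ [it.1]))
              (List.replicate (b.length + 1) ([] : List Int)))
            c []).foldl
          (fun acc v => acc ++ PySem.List.pyRepeat [v] c) acc) []
      = flatList b := by
  rw [PySem.Dict.foldl_insert_getD_add_one_eq_counter]
  have hitsP : ∀ it ∈ (PySem.Dict.counter b).items, 1 ≤ it.2 ∧ it.2 ≤ (b.length : Int) := by
    intro it hit
    rw [PySem.Dict.items_counter] at hit
    obtain ⟨k, hk, rfl⟩ := List.mem_map.mp hit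
    have hkb : k ∈ b := (PySem.Set.mem_ofList b k).mp hk
    have h1 : 0 < List.count k b := List.count_pos_iff.mpr hkb
    have h2 : List.count k b ≤ b.length := List.count_le_length
    constructor
    · show (1 : Int) ≤ (List.count k b : Int)
      exact_mod_cast h1
    · show (List.count k b : Int) ≤ (b.length : Int)
      exact_mod_cast h2
  have hbk0 : ∀ c : Int, 0 ≤ c →
      PySem.List.pyGetD (List.replicate (b.length + 1) ([] : List Int)) c [] = [] := by
    intro c hc
    have hcc : c = ((c.toNat : Nat) : Int) := by omega
    rw [hcc, PySem.List.pyGetD_natCast]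
    rcases Nat.lt_or_ge c.toNat (b.length + 1) with h | h
    · rw [List.getD_eq_getElem?_getD, List.getElem?_replicate, if_pos h]; rfl
    · rw [List.getD_eq_getElem?_getD, List.getElem?_eq_none (by simpa using h)]; rfl
  have hmemcs : ∀ c ∈ PySem.List.pyRange (b.length : Int) 0 (-1), 1 ≤ c ∧ c ≤ (b.length : Int) := by
    intro c hc
    rw [pyRange_desc] at hc
    obtain ⟨k, hk, rfl⟩ := List.mem_map.mp hc
    rw [List.mem_range] at hk
    omega
  have hbuck : ∀ c ∈ PySem.List.pyRange (b.length : Int) 0 (-1),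
      PySem.List.pyGetD
          ((PySem.Dict.counter b).items.foldl
            (fun bk (it : Int × Int) =>
              PySem.List.pySetD bk it.2 (PySem.List.pyGetD bk it.2 [] ++ [it.1]))
            (List.replicate (b.length + 1) ([] : List Int)))
          c []
        = (((PySem.Dict.counter b).items.filter (fun it => decide (it.2 = c))).map (·.1)) := by
    intro c hc
    have hcb := hmemcs c hc
    rw [buckets_getD ((PySem.Dict.counter b).items) _ c (by omega)
        (by rw [List.length_replicate]; push_cast; omega)
        (fun it hit => by
          have := hitsP it hit
          rw [List.length_replicate]
          omega)]
    rw [hbk0 c (by omega), List.nil_append]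
  have h1 := PySem.List.foldl_congr_mem (PySem.List.pyRange (b.length : Int) 0 (-1))
      (fun acc c =>
        (PySem.List.pyGetD
            ((PySem.Dict.counter b).items.foldl
              (fun bk (it : Int × Int) =>
                PySem.List.pySetD bk it.2 (PySem.List.pyGetD bk it.2 [] ++ [it.1]))
              (List.replicate (b.length + 1) ([] : List Int)))
            c []).foldl
          (fun acc v => acc ++ PySem.List.pyRepeat [v] c) acc)
      (fun acc c => acc ++
        ((PySem.List.pyGetD
            ((PySem.Dict.counter b).items.foldl
              (fun bk (it : Int × Int) =>
                PySem.List.pySetD bk it.2 (PySem.List.pyGetD bk it.2 [] ++ [it.1]))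
              (List.replicate (b.length + 1) ([] : List Int)))
            c []).flatMap (fun v => List.replicate c.toNat v)))
      []
      (by
        intro acc c hc
        dsimp only
        rw [PySem.List.foldl_append_eq_flatMap]
        simp only [PySem.List.pyRepeat_singleton])
  rw [h1, PySem.List.foldl_append_eq_flatMap, List.nil_append]
  have hstep2 : (PySem.List.pyRange (b.length : Int) 0 (-1)).flatMap
        (fun c => (PySem.List.pyGetD
            ((PySem.Dict.counter b).items.foldl
              (fun bk (it : Int × Int) =>
                PySem.List.pySetD bk it.2 (PySem.List.pyGetD bk it.2 [] ++ [it.1]))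
              (List.replicate (b.length + 1) ([] : List Int)))
            c []).flatMap (fun v => List.replicate c.toNat v))
      = (PySem.List.pyRange (b.length : Int) 0 (-1)).flatMap
        (fun c => ((PySem.Dict.counter b).items.filter (fun it => decide (it.2 = c))).flatMap
          (fun it => List.replicate it.2.toNat it.1)) := by
    apply List.flatMap_congr
    intro c hc
    rw [hbuck c hc, flatMap_filter_const]
  rw [hstep2]
  unfold flatList
  rw [PySem.Dict.foldl_insert_getD_add_one_eq_counter]
  have hdesc := PySem.List.sorted_pairwise_rev ((PySem.Dict.counter b).items)
    (fun x : Int × Int => x.2)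
  have hcspw : (PySem.List.pyRange (b.length : Int) 0 (-1)).Pairwise (fun a b => b < a) := by
    rw [pyRange_desc, List.pairwise_map]
    exact (List.pairwise_lt_range).imp (fun hab => by omega)
  have hcov : ∀ y ∈ PySem.List.sorted ((PySem.Dict.counter b).items) (fun x : Int × Int => x.2) true,
      y.2 ∈ PySem.List.pyRange (b.length : Int) 0 (-1) := by
    intro y hy
    have hmem : y ∈ (PySem.Dict.counter b).items := by
      rw [PySem.List.mem_sorted] at hy
      exact hy
    have := hitsP y hmem
    rw [pyRange_desc]
    exact List.mem_map.mpr ⟨b.length - y.2.toNat, List.mem_range.mpr (by omega), by omega⟩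
  have hdecomp := desc_eq_flatMap_filter (fun x : Int × Int => x.2)
    (PySem.List.pyRange (b.length : Int) 0 (-1))
    (PySem.List.sorted ((PySem.Dict.counter b).items) (fun x : Int × Int => x.2) true)
    hdesc hcspw hcov
  conv_rhs => rw [hdecomp]
  rw [List.flatMap_assoc]
  apply List.flatMap_congr
  intro c hc
  rw [sorted_rev_filter (fun x : Int × Int => x.2) c]

-- the interleaving loop, written as a recursion (proof-side view of B's loop)
def weave : List Int → List Int → List Int
  | [], _ => []
  | e :: es, [] => e :: weave es []
  | e :: es, o :: os => e :: o :: weave es os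

-- B's enumerate loop computes weave
theorem fold_weave (O : List Int) :
    ∀ (E : List Int) (k : Nat) (res : List Int),
      (E.zipIdx k).foldl (fun res (p : Int × Nat) =>
          if p.2 < O.length then res ++ [p.1] ++ [PySem.List.pyGetD O (p.2 : Int) 0]
          else res ++ [p.1]) res
        = res ++ weave E (O.drop k) := by
  intro E
  induction E with
  | nil => intro k res; simp [weave]
  | cons e es ih =>
    intro k res
    rw [List.zipIdx_cons, List.foldl_cons]
    dsimp only
    by_cases hk : k < O.length
    · have hdrop : O.drop k = O[k] :: O.drop (k + 1) := List.drop_eq_getElem_cons hk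
      rw [hdrop, if_pos hk, ih (k + 1)]
      have hget : PySem.List.pyGetD O (k : Int) 0 = O[k] :=
        PySem.List.pyGetD_eq_getElem O 0 (by omega) (by exact_mod_cast hk)
      rw [hget]
      simp [weave]
    · have hdrop : O.drop k = [] := List.drop_eq_nil_of_le (by omega)
      have hdrop' : O.drop (k + 1) = [] := List.drop_eq_nil_of_le (by omega)
      rw [hdrop, if_neg hk, ih (k + 1), hdrop']
      simp [weave]

theorem weave_eq : ∀ (E O : List Int), O.length ≤ E.length → E.length ≤ O.length + 1 →
    weave E O = (List.range (E.length + O.length)).map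
      (fun i => if i % 2 = 0 then E.getD (i / 2) 0 else O.getD (i / 2) 0) := by
  intro E
  induction E with
  | nil =>
    intro O h1 _
    have : O = [] := List.eq_nil_of_length_eq_zero (by simpa using h1)
    subst this; rfl
  | cons e es ih =>
    intro O h1 h2
    cases O with
    | nil =>
      have hes : es = [] := by
        simp only [List.length_cons, List.length_nil] at h2
        exact List.eq_nil_of_length_eq_zero (by omega)
      subst hes
      simp [weave, List.range_succ]
    | cons o os =>
      have h1' : os.length ≤ es.length := by
        simp only [List.length_cons] at h1; omega
      have h2' : es.length ≤ os.length + 1 := by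
        simp only [List.length_cons] at h2; omega
      show e :: o :: weave es os = _
      rw [ih os h1' h2']
      have hlen : (e :: es).length + (o :: os).length = es.length + os.length + 2 := by
        simp only [List.length_cons]; omega
      rw [hlen]
      have hrange : List.range (es.length + os.length + 2)
          = 0 :: 1 :: (List.range (es.length + os.length)).map (fun k => k + 2) := by
        rw [List.range_succ_eq_map, List.range_succ_eq_map, List.map_cons, List.map_map]
        rfl
      rw [hrange, List.map_cons, List.map_cons, List.map_map]
      refine congrArg₂ _ (by simp) (congrArg₂ _ (by simp) ?_)
      apply List.map_congr_left
      intro k _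
      simp only [Function.comp]
      have hmod : (k + 2) % 2 = k % 2 := by omega
      have hdiv : (k + 2) / 2 = k / 2 + 1 := by omega
      rw [hmod, hdiv]
      by_cases hp : k % 2 = 0 <;> simp [hp]

-- B in closed form over List.range and Nat arithmetic
theorem alt_closed (b : List Int) :
    find_alt b = (List.range b.length).map (fun i =>
      if i % 2 = 0 then (flatList b).getD (i / 2) 0
      else (flatList b).getD ((b.length + 1) / 2 + i / 2) 0) := by
  unfold find_alt
  dsimp only
  rw [flatB_eq]
  have hhalf : PySem.Int.floordiv ((b.length : Int) + 1) 2 = (((b.length + 1) / 2 : Nat) : Int) := by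
    rw [show ((b.length : Int) + 1) = (((b.length + 1 : Nat)) : Int) by push_cast; ring]
    exact_mod_cast PySem.Int.floordiv_natCast (b.length + 1) 2
  rw [hhalf, PySem.List.slice_to _ (Int.natCast_nonneg _),
      PySem.List.slice_from _ (Int.natCast_nonneg _), Int.toNat_natCast]
  have hfl : (flatList b).length = b.length := length_flat b
  have hElen : ((flatList b).take ((b.length + 1) / 2)).length = (b.length + 1) / 2 := by
    simp [hfl]; omega
  have hOlen : ((flatList b).drop ((b.length + 1) / 2)).length = b.length - (b.length + 1) / 2 := by
    simp [hfl]
  rw [fold_weave (List.drop ((b.length + 1) / 2) (flatList b))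
        (List.take ((b.length + 1) / 2) (flatList b)) 0 [],
      List.drop_zero, List.nil_append]
  rw [weave_eq _ _ (by rw [hElen, hOlen]; omega) (by rw [hElen, hOlen]; omega)]
  rw [hElen, hOlen, show (b.length + 1) / 2 + (b.length - (b.length + 1) / 2) = b.length by omega]
  apply List.map_congr_left
  intro i hi
  rw [List.mem_range] at hi
  by_cases hp : i % 2 = 0
  · rw [if_pos hp, if_pos hp]
    rw [List.getD_eq_getElem?_getD, List.getD_eq_getElem?_getD, List.getElem?_take,
        if_pos (by omega)]
  · rw [if_neg hp, if_neg hp]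
    rw [List.getD_eq_getElem?_getD, List.getD_eq_getElem?_getD, List.getElem?_drop]

-- A in closed form: write evens first, then odds
theorem a_closed (b : List Int) :
    find b = writeAt2
      (writeAt2 ((PySem.List.pyRange 0 (b.length : Int)).map (fun _ => (0 : Int))) 0
        ((flatList b).take ((b.length + 1) / 2)))
      1 ((flatList b).drop ((b.length + 1) / 2)) := by
  unfold find
  show ((PySem.List.sorted
      ((b.foldl (fun d a => d.insert a ((PySem.List.count b a : Int))) PySem.Dict.empty).items)
      (fun x => x.2) true).foldl
      (fun st it => (PySem.List.pyRange 0 it.2).foldl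
          (fun st _ => stepW (b.length : Int) st it.1) st)
      ((PySem.List.pyRange 0 (b.length : Int)).map (fun _ => (0 : Int)), 0)).1 = _
  rw [dicts_items_eq]
  simp only [inner_loop_eq]
  rw [← List.foldl_flatMap, ← flatList.eq_def]
  set n := b.length with hn
  set c := (n + 1) / 2 with hc
  set flat := flatList b with hflat
  set re0 := (PySem.List.pyRange 0 (n : Int)).map (fun _ => (0 : Int)) with hre0
  have hfl : flat.length = n := length_flat b
  conv_lhs => rw [← List.take_append_drop c flat]
  rw [List.foldl_append]
  by_cases hn0 : n = 0
  · have hnil : flat = [] := List.eq_nil_of_length_eq_zero (by omega)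
    simp [hnil, writeAt2]
  · have hE : (flat.take c).length = c := by simp [List.length_take]; omega
    have hO : (flat.drop c).length = n - c := by simp [List.length_drop, hfl]
    have h1 := run_gen n (flat.take c) re0 0 (by omega)
    simp only [Nat.cast_zero] at h1
    rw [h1, if_neg (by intro hx; rw [hx] at hE; simp at hE; omega),
        if_pos (by rw [hE]; omega)]
    have h2 := run_gen n (flat.drop c) (writeAt2 re0 0 (flat.take c)) 1 (by omega)
    simp only [Nat.cast_one] at h2
    rw [h2]

-- ===== VERDICT (by name: the statement is the Claim_ definition above) =====
theorem find_spec : Claim_equal_find := by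
  intro b _
  unfold Spec_find
  rw [a_closed, alt_closed]
  set n := b.length with hn
  set c := (n + 1) / 2 with hc
  set flat := flatList b with hflat
  have hfl : flat.length = n := length_flat b
  set re0 := (PySem.List.pyRange 0 (n : Int)).map (fun _ => (0 : Int)) with hre0
  have hre0len : re0.length = n := by
    simp [hre0, PySem.List.length_pyRange_one]
  have hElen : (flat.take c).length = c := by
    simp [List.length_take, hfl]; omega
  have hOlen : (flat.drop c).length = n - c := by
    simp [List.length_drop, hfl]
  have hW1len : (writeAt2 re0 0 (flat.take c)).length = n := by
    rw [length_writeAt2, hre0len]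
  apply List.ext_getElem
  · rw [length_writeAt2, hW1len]; simp
  · intro i hi hi2
    have hin : i < n := by rwa [length_writeAt2, hW1len] at hi
    rw [List.getElem_map, List.getElem_range]
    rw [← List.getD_eq_getElem _ 0, getD_writeAt2 _ _ _ _ (by rw [hW1len, hOlen]; omega)]
    by_cases hpar : i % 2 = 0
    · rw [if_neg (by rintro ⟨h1, h2, h3⟩; omega), if_pos hpar,
          getD_writeAt2 _ _ _ _ (by rw [hre0len, hElen]; omega)]
      rw [if_pos ⟨Nat.zero_le i, by omega, by rw [hElen]; omega⟩]
      simp only [Nat.sub_zero]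
      rw [List.getD_eq_getElem?_getD, List.getD_eq_getElem?_getD, List.getElem?_take,
          if_pos (by omega)]
    · rw [if_pos ⟨by omega, by omega, by rw [hOlen]; omega⟩, if_neg hpar]
      rw [List.getD_eq_getElem?_getD, List.getD_eq_getElem?_getD, List.getElem?_drop,
          show c + (i - 1) / 2 = c + i / 2 by omega]
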